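-- pv_equiv track=rewrite | github.com/polkmn222/md_skill_craft | src/md_skill_craft/config/pricing.py | get_models_by_provider
-- ===== SOURCE A (Python) =====
-- PRICING_PER_1M: dict[str, dict[str, float]] = {
--     # Claude (Anthropic)
--     "claude-opus-4-6": {"input": 15.00, "output": 75.00},
--     "claude-sonnet-4-6": {"input": 3.00, "output": 15.00},
--     "claude-haiku-4-5-20251001": {"input": 0.80, "output": 4.00},
--     # GPT (OpenAI)
--     "gpt-4o": {"input": 2.50, "output": 10.00},
--     "gpt-4-turbo": {"input": 10.00, "output": 30.00},
--     "gpt-4o-mini": {"input": 0.15, "output": 0.60},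
--     # Gemini (Google)
--     "gemini-2.0-flash": {"input": 0.10, "output": 0.40},
--     "gemini-2.0-pro": {"input": 1.25, "output": 5.00},
-- }
--
-- def get_models_by_provider(provider: str) -> list[str]:
--     """Get list of models for specific provider.
--
--     Args:
--         provider: Provider name ("claude", "gpt", or "gemini")
--
--     Returns:
--         List of model names for the provider
--     """
--     prefix_map = {
--         "claude": "claude-",
--         "gpt": "gpt-",
--         "gemini": "gemini-",
--     }
--
--     if provider not in prefix_map:
--         return []
--
--     prefix = prefix_map[provider]
--     return [m for m in PRICING_PER_1M.keys() if m.startswith(prefix)]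
-- ===== SOURCE B (Python) =====
-- PRICING_PER_1M: dict[str, dict[str, float]] = {
--     "claude-opus-4-6": {"input": 15.00, "output": 75.00},
--     "claude-sonnet-4-6": {"input": 3.00, "output": 15.00},
--     "claude-haiku-4-5-20251001": {"input": 0.80, "output": 4.00},
--     "gpt-4o": {"input": 2.50, "output": 10.00},
--     "gpt-4-turbo": {"input": 10.00, "output": 30.00},
--     "gpt-4o-mini": {"input": 0.15, "output": 0.60},
--     "gemini-2.0-flash": {"input": 0.10, "output": 0.40},
--     "gemini-2.0-pro": {"input": 1.25, "output": 5.00},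
-- }
--
-- # Index built once: provider name (leading '-'-segment of each model key) -> ordered models.
-- _INDEX: dict[str, list[str]] = {}
-- for _m in PRICING_PER_1M:
--     _INDEX.setdefault(_m.split('-', 1)[0], []).append(_m)
--
--
-- def get_models_by_provider(provider: str) -> list[str]:
--     return list(_INDEX.get(provider, []))
-- ===== Notes on version B (the rewrite author's own statement) =====
-- stated objective: alternative
-- what changed: B builds a provider-to-models index once by grouping the PRICING_PER_1M keys on their leading segment, and each call is then a single dict lookup instead of a membership test plus a prefix scan over all keys.
import Mathlib
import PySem

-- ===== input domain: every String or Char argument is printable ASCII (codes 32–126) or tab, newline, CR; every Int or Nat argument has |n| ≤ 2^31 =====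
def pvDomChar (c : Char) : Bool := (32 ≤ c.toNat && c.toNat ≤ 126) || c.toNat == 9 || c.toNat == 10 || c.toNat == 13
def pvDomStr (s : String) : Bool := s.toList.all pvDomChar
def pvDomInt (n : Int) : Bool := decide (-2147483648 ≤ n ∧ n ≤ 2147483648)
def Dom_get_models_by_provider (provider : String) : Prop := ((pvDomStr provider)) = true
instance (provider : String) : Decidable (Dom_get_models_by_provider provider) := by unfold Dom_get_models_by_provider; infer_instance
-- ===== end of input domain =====

-- B replaces A's per-call membership test + prefix scan with a once-built provider→models
-- index looked up per call (objective: alternative decomposition; lookup instead of scan).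

-- PRICING_PER_1M keys in insertion order (shared module-level constant of both programs)
def pricingKeys : List String :=
  ["claude-opus-4-6", "claude-sonnet-4-6", "claude-haiku-4-5-20251001",
   "gpt-4o", "gpt-4-turbo", "gpt-4o-mini",
   "gemini-2.0-flash", "gemini-2.0-pro"]

-- ===== PORT A =====
def get_models_by_provider (provider : String) : List String :=
  let prefix_map : PySem.Dict String String :=
    PySem.Dict.mk [("claude", "claude-"), ("gpt", "gpt-"), ("gemini", "gemini-")]
  if (PySem.Dict.get? prefix_map provider).isNone then []
  else
    let pfx := PySem.Dict.getD prefix_map provider ""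
    pricingKeys.filter (fun m => PySem.Str.startswith m pfx)

-- ===== PORT B =====
-- _INDEX: fold over the pricing keys, grouping each under m.split('-', 1)[0]
def pvIndex : PySem.Dict String (List String) :=
  pricingKeys.foldl
    (fun d m =>
      d.modify (PySem.List.pyGetD ((PySem.Str.splitMax? m "-" 1).getD []) 0 "") [] (· ++ [m]))
    PySem.Dict.empty

def get_models_by_provider_alt (provider : String) : List String :=
  PySem.Dict.getD pvIndex provider []

-- ===== PRECONDITION & SPEC =====
def Spec_get_models_by_provider (provider : String) (out : List String) : Prop := out = get_models_by_provider_alt provider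
instance (provider : String) (out : List String) : Decidable (Spec_get_models_by_provider provider out) := by unfold Spec_get_models_by_provider; infer_instance

-- ===== CLAIM (what is proved, stated in full; the proofs are below) =====
def Claim_equal_get_models_by_provider : Prop := ∀ (provider : String), Dom_get_models_by_provider provider → Spec_get_models_by_provider provider (get_models_by_provider provider)

-- ===== LEMMAS AND PROOFS =====

-- the one-time fold evaluates to this literal index
theorem pvIndex_eq :
    pvIndex = PySem.Dict.mk
      [("claude", ["claude-opus-4-6", "claude-sonnet-4-6", "claude-haiku-4-5-20251001"]),
       ("gpt", ["gpt-4o", "gpt-4-turbo", "gpt-4o-mini"]),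
       ("gemini", ["gemini-2.0-flash", "gemini-2.0-pro"])] := by decide

-- ===== VERDICT (by name: the statement is the Claim_ definition above) =====
theorem get_models_by_provider_spec : Claim_equal_get_models_by_provider := by
  intro provider _
  unfold Spec_get_models_by_provider get_models_by_provider get_models_by_provider_alt
  rw [pvIndex_eq]
  by_cases h1 : provider = "claude"
  · subst h1; decide
  by_cases h2 : provider = "gpt"
  · subst h2; decide
  by_cases h3 : provider = "gemini"
  · subst h3; decide
  simp [PySem.Dict.getD, PySem.Dict.get?, Ne.symm h1, Ne.symm h2, Ne.symm h3]
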